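-- pv_equiv track=rewrite | github.com/Sam-MJ/SausageFileConverter | src/utils.py | find_files_without_variations
-- ===== SOURCE A (Python) =====
-- def find_files_without_variations(correct_duration_list: list, file_names: list):
--     """Find files without variations by taking list of list of correct_duration_list and comparing them with original file list."""
--
--     files_without_vars = []
--     files_with_vars = []  # flat list
--
--     # flatten files_with_variations
--     for files in correct_duration_list:
--         files_with_vars.extend(files)
--
--     for file in file_names:
--         if file not in files_with_vars:
--             files_without_vars.append(file)
--
--     return files_without_vars
-- ===== SOURCE B (Python) =====
-- def find_files_without_variations(correct_duration_list: list, file_names: list):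
--     """Sieve approach: start from all file_names and let each nested list of
--     variations eliminate its members from the remaining candidates. The outer
--     loop runs over the nested structure, not over the files; no flattened list
--     is ever built and no file is ever searched for in the whole structure."""
--     remaining = list(file_names)
--     for files in correct_duration_list:
--         eliminate = set(files)
--         remaining = [f for f in remaining if f not in eliminate]
--     return remaining
-- ===== Notes on version B (the rewrite author's own statement) =====
-- stated objective: faster
-- what changed: B inverts the loop structure: instead of flattening everything and then testing each file against the flat list, it iterates over the nested variation lists and sieves the candidate file list, each sublist (as a hash set) eliminating its members from the remaining candidates in O(1) per test.
import Mathlib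
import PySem

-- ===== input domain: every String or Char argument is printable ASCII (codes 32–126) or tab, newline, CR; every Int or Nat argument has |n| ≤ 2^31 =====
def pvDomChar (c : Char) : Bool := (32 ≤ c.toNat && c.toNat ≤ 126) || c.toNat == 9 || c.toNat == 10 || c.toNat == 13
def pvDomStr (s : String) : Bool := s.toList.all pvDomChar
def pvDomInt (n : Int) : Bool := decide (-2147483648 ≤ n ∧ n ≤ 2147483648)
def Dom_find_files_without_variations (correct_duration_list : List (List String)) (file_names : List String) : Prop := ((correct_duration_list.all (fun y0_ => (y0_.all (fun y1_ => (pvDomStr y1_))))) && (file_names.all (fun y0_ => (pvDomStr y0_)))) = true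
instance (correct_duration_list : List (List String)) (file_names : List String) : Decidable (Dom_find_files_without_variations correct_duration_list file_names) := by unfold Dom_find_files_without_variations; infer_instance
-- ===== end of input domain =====

-- B inverts the loop structure: it sieves the candidate files by iterating over the nested lists (each as a set), never building A's flattened list (objective: faster, constant-factor via hashed membership).

-- ===== PORT A =====
def find_files_without_variations (correct_duration_list : List (List String)) (file_names : List String) : List String :=
  -- flatten files_with_variations
  let files_with_vars := correct_duration_list.foldl (fun acc files => acc ++ files) []
  -- second loop: append each file not in the flat list
  file_names.foldl (fun acc file => if files_with_vars.contains file then acc else acc ++ [file]) []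

-- ===== PORT B =====
def find_files_without_variations_alt (correct_duration_list : List (List String)) (file_names : List String) : List String :=
  correct_duration_list.foldl
    (fun remaining files =>
      let eliminate := PySem.Set.ofList files
      remaining.filter (fun f => !(PySem.Set.contains eliminate f)))
    file_names

-- ===== PRECONDITION & SPEC =====
def Spec_find_files_without_variations (correct_duration_list : List (List String)) (file_names : List String) (out : List String) : Prop := out = find_files_without_variations_alt correct_duration_list file_names
instance (correct_duration_list : List (List String)) (file_names : List String) (out : List String) : Decidable (Spec_find_files_without_variations correct_duration_list file_names out) := by unfold Spec_find_files_without_variations; infer_instance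

-- ===== CLAIM (what is proved, stated in full; the proofs are below) =====
def Claim_equal_find_files_without_variations : Prop := ∀ (correct_duration_list : List (List String)) (file_names : List String), Dom_find_files_without_variations correct_duration_list file_names → Spec_find_files_without_variations correct_duration_list file_names (find_files_without_variations correct_duration_list file_names)

-- ===== LEMMAS AND PROOFS =====

-- A's flattening loop produces init ++ flatten
theorem pv_foldl_flatten (l : List (List String)) (init : List String) :
    l.foldl (fun acc files => acc ++ files) init = init ++ l.flatten := by
  induction l generalizing init with
  | nil => simp
  | cons h t ih => simp [List.foldl, ih, List.append_assoc]

-- A's filter loop is init ++ filter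
theorem pv_foldl_filter (p : String → Bool) (fns : List String) (init : List String) :
    fns.foldl (fun acc file => if p file then acc else acc ++ [file]) init
      = init ++ fns.filter (fun file => ! p file) := by
  induction fns generalizing init with
  | nil => simp
  | cons h t ih =>
    by_cases hp : p h = true <;> simp [List.foldl, ih, hp, List.append_assoc]

-- B's sieve over the nested lists is one filter against the flattened membership
theorem pv_sieve_eq_filter (cdl : List (List String)) (fns : List String) :
    cdl.foldl
      (fun remaining files =>
        remaining.filter (fun f => !(PySem.Set.contains (PySem.Set.ofList files) f)))
      fns
      = fns.filter (fun f => !(cdl.flatten.contains f)) := by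
  induction cdl generalizing fns with
  | nil => simp
  | cons h t ih =>
    rw [List.foldl_cons, ih, List.filter_filter]
    apply List.filter_congr
    intro f _
    simp [PySem.Set.contains, PySem.Set.mem_ofList]
    exact Bool.and_comm _ _

-- ===== VERDICT (by name: the statement is the Claim_ definition above) =====
theorem find_files_without_variations_spec : Claim_equal_find_files_without_variations := by
  intro cdl fns _
  unfold Spec_find_files_without_variations find_files_without_variations find_files_without_variations_alt
  simp only [pv_foldl_flatten, List.nil_append, pv_foldl_filter, pv_sieve_eq_filter]
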